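-- pv_equiv track=rewrite | github.com/vhsabino/data-science-python | Alura/python-para-data-science-trabalhando-com-funcoes/aula-02/02_08_pontuacao.py | calcula_pontos
-- ===== SOURCE A (Python) =====
-- def calcula_pontos(gols_marcados: list, gols_sofridos: list):
--     resultado = map(lambda x, y: x-y, gols_marcados, gols_sofridos)
--     pontuacao = 0
--     for r in resultado:
--         if r > 0:
--             pontuacao += 3
--         elif r == 0:
--             pontuacao += 1
--         else:
--             pontuacao +=0
--     return pontuacao
-- ===== SOURCE B (Python) =====
-- def calcula_pontos(gols_marcados: list, gols_sofridos: list):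
--     pares = list(zip(gols_marcados, gols_sofridos))
--     vitorias = sum(1 for x, y in pares if x > y)
--     empates = sum(1 for x, y in pares if x == y)
--     return 3 * vitorias + empates
-- ===== Notes on version B (the rewrite author's own statement) =====
-- stated objective: simpler
-- what changed: Replaces the per-game difference map and accumulator loop with two aggregate counts over the zipped pairs (wins, draws) combined by the closed form 3*wins + draws.
import Mathlib
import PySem

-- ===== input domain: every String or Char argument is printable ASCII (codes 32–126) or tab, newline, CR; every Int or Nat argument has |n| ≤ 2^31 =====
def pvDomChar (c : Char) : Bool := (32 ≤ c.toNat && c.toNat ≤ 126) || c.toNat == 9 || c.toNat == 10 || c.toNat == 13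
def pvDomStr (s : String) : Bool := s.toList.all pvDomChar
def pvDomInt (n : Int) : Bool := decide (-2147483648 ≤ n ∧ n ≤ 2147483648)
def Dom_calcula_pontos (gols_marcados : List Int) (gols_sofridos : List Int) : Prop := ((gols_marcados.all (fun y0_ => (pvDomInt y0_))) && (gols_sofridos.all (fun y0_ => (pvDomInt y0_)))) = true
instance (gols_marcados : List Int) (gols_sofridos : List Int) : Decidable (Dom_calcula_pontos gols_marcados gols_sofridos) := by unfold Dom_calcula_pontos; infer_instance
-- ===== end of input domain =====

-- ===== PORT A =====
-- A: map(λ x y, x−y) over both lists (truncating at the shortest), then a fold adding 3/1/0 per result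
def calcula_pontos (gols_marcados : List Int) (gols_sofridos : List Int) : Int :=
  let resultado := List.zipWith (fun x y => x - y) gols_marcados gols_sofridos
  resultado.foldl (fun pontuacao r => if r > 0 then pontuacao + 3 else if r = 0 then pontuacao + 1 else pontuacao + 0) 0

-- ===== PORT B =====
-- B: count wins and draws over the zipped pairs, closed form 3*wins + draws (objective: simpler)
def calcula_pontos_alt (gols_marcados : List Int) (gols_sofridos : List Int) : Int :=
  let pares := List.zip gols_marcados gols_sofridos
  let vitorias : Int := (pares.countP (fun p => p.1 > p.2) : Nat)
  let empates : Int := (pares.countP (fun p => p.1 = p.2) : Nat)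
  3 * vitorias + empates

-- ===== PRECONDITION & SPEC =====
def Spec_calcula_pontos (gols_marcados : List Int) (gols_sofridos : List Int) (out : Int) : Prop := out = calcula_pontos_alt gols_marcados gols_sofridos
instance (gols_marcados : List Int) (gols_sofridos : List Int) (out : Int) : Decidable (Spec_calcula_pontos gols_marcados gols_sofridos out) := by unfold Spec_calcula_pontos; infer_instance

-- ===== CLAIM (what is proved, stated in full; the proofs are below) =====
def Claim_equal_calcula_pontos : Prop := ∀ (gols_marcados : List Int) (gols_sofridos : List Int), Dom_calcula_pontos gols_marcados gols_sofridos → Spec_calcula_pontos gols_marcados gols_sofridos (calcula_pontos gols_marcados gols_sofridos)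

-- ===== LEMMAS AND PROOFS =====

-- ===== VERDICT (by name: the statement is the Claim_ definition above) =====
theorem pontos_core (gm gs : List Int) (acc : Int) :
    (List.zipWith (fun x y => x - y) gm gs).foldl
      (fun pontuacao r => if r > 0 then pontuacao + 3 else if r = 0 then pontuacao + 1 else pontuacao + 0) acc
    = acc + 3 * (((gm.zip gs).countP (fun p => p.1 > p.2) : Nat) : Int)
        + (((gm.zip gs).countP (fun p => p.1 = p.2) : Nat) : Int) := by
  induction gm generalizing gs acc with
  | nil => simp
  | cons x t ih =>
    cases gs with
    | nil => simp
    | cons y u =>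
      simp only [List.zipWith_cons_cons, List.foldl_cons, List.zip_cons_cons, List.countP_cons, ih]
      by_cases hw : x > y
      · have h1 : x - y > 0 := by omega
        have h2 : ¬ (x = y) := by omega
        simp [h2, hw]
        ring
      · by_cases hd : x = y
        · have h1 : ¬ (x - y > 0) := by omega
          simp [hd]
          ring
        · have h1 : ¬ (x - y > 0) := by omega
          have h2 : ¬ (x - y = 0) := by omega
          simp [h2, hw, hd]

theorem calcula_pontos_spec : Claim_equal_calcula_pontos := by
  intro gm gs _
  unfold Spec_calcula_pontos calcula_pontos calcula_pontos_alt
  simp only [pontos_core]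
  ring
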